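-- pv_equiv track=rewrite | github.com/delkind/mouse-brain-cell-counting | brain_explorer.py | compute_parameters
-- ===== SOURCE A (Python) =====
-- import itertools
-- import operator
-- from collections import defaultdict
--
-- BOTH_HEMISPHERES = 'both'
--
-- def separate_hemispheres(parameters):
--     parameter_dict = defaultdict(list)
--
--     for param in parameters:
--         if param.endswith('_left'):
--             param_name = param[:-5]  # remove '_left'
--             parameter_dict[param_name].append('left')
--         elif param.endswith('_right'):
--             param_name = param[:-6]  # remove '_right'
--             parameter_dict[param_name].append('right')
--         else:
--             parameter_dict[param] += []
--
--     return {k: ([], [BOTH_HEMISPHERES] + v) for k, v in parameter_dict.items()}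
--
-- def compute_parameters(parameters):
--     parameters = list(filter(lambda s: '.' not in s, parameters))
--     macroscopic = sorted([p for p in parameters if '|' not in p])
--     microscopic = sorted([p for p in parameters if '|' in p])
--     macroscopic = separate_hemispheres(macroscopic)
--     microscopic = [(k.split('|')[0], k.split('|')[1]) for k in microscopic]
--     microscopic = sorted(microscopic, key=operator.itemgetter(0))  # this might be unnecessary
--     microscopic = {k: ([t[1] for t in v], [BOTH_HEMISPHERES]) for k, v in
--                    itertools.groupby(microscopic, operator.itemgetter(0))}
--     return macroscopic, microscopic
-- ===== SOURCE B (Python) =====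
-- BOTH_HEMISPHERES = 'both'
--
--
-- def compute_parameters(parameters):
--     # One unsorted accumulation pass; ordering is reconstructed afterwards by
--     # sorting only the (few) keys / per-key buckets instead of the whole input.
--     macro = {}  # name -> (has_bare, n_left, n_right)
--     micro = {}  # first '|'-component -> list of the full parameter strings
--     for s in parameters:
--         if '.' in s:
--             continue
--         if '|' in s:
--             micro.setdefault(s.split('|')[0], []).append(s)
--         elif s.endswith('_left'):
--             name = s[:-5]
--             bare, nl, nr = macro.get(name, (False, 0, 0))
--             macro[name] = (bare, nl + 1, nr)
--         elif s.endswith('_right'):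
--             name = s[:-6]
--             bare, nl, nr = macro.get(name, (False, 0, 0))
--             macro[name] = (bare, nl, nr + 1)
--         else:
--             bare, nl, nr = macro.get(s, (False, 0, 0))
--             macro[s] = (True, nl, nr)
--
--     def rep(name):
--         bare, nl, nr = macro[name]
--         if bare:
--             return name
--         if nl > 0:
--             return name + '_left'
--         return name + '_right'
--
--     macroscopic = {
--         name: ([], [BOTH_HEMISPHERES]
--                + ['left'] * macro[name][1] + ['right'] * macro[name][2])
--         for name in sorted(macro, key=rep)
--     }
--     microscopic = {
--         k: ([x.split('|')[1] for x in sorted(micro[k])], [BOTH_HEMISPHERES])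
--         for k in sorted(micro)
--     }
--     return macroscopic, microscopic
-- ===== Notes on version B (the rewrite author's own statement) =====
-- stated objective: alternative
-- what changed: A filters, sorts the whole parameter list twice and pushes it through a defaultdict loop plus a pair/stable-sort/itertools.groupby pipeline; B makes one unsorted accumulation pass building per-name hemisphere counts and per-key string buckets, then reconstructs A's ordering by sorting only the keys (macroscopic keys by a representative string, microscopic keys directly) and each microscopic bucket.
import Mathlib
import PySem

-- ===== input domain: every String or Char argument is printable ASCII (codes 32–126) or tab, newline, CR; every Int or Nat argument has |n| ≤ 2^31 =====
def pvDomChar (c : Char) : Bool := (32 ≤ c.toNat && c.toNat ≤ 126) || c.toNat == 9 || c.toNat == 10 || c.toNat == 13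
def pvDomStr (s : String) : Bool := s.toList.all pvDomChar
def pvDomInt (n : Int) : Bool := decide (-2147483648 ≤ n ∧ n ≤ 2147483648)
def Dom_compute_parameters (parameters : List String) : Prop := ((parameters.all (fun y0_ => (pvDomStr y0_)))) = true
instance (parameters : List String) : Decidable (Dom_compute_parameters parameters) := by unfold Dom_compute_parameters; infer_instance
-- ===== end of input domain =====

-- B replaces A's filter/sort-twice/defaultdict/groupby pipeline by one unsorted
-- accumulation pass plus final sorts of the keys and per-key buckets only (alternative decomposition).

-- s.split('|')[0] / s.split('|')[1]; pyGetD with default "" is exact here: both ports only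
-- apply these to strings containing '|', whose split always has at least two parts (and [0] always exists).
def pvPart0 (s : String) : String := PySem.List.pyGetD ((PySem.Str.split? s "|").getD []) 0 ""
def pvPart1 (s : String) : String := PySem.List.pyGetD ((PySem.Str.split? s "|").getD []) 1 ""

-- ===== PORT A =====
def separate_hemispheres (parameters : List String) : List (String × List String × List String) :=
  let parameter_dict : PySem.Dict String (List String) :=
    parameters.foldl (fun d param =>
      if PySem.Str.endswith param "_left" then
        d.modify (PySem.Str.slice param none (some (-5))) [] (fun v => v ++ ["left"])
      else if PySem.Str.endswith param "_right" then
        d.modify (PySem.Str.slice param none (some (-6))) [] (fun v => v ++ ["right"])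
      else
        d.modify param [] (fun v => v ++ [])) PySem.Dict.empty
  -- {k: ([], [BOTH_HEMISPHERES] + v) for k, v in parameter_dict.items()}
  (parameter_dict.items.foldl
    (fun d kv => d.insert kv.1 (([] : List String), "both" :: kv.2)) PySem.Dict.empty).items

-- itertools.groupby(l, itemgetter(0)) on a list of pairs: maximal runs of equal first components
def pvGroupby : List (String × String) → List (String × List (String × String))
  | [] => []
  | (k, v) :: rest =>
      (k, (k, v) :: rest.takeWhile (fun t => t.1 == k)) ::
        pvGroupby (rest.dropWhile (fun t => t.1 == k))
  termination_by l => l.length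
  decreasing_by
    simp only [List.length_cons]
    exact Nat.lt_succ_of_le (List.length_dropWhile_le _ _)

def compute_parameters (parameters : List String) : (List (String × List String × List String)) × (List (String × List String × List String)) :=
  let parameters := parameters.filter (fun s => !(PySem.Str.isIn "." s))
  let macroscopic := PySem.List.sorted (parameters.filter (fun p => !(PySem.Str.isIn "|" p))) (fun x => x) false
  let microscopic := PySem.List.sorted (parameters.filter (fun p => PySem.Str.isIn "|" p)) (fun x => x) false
  let macroscopic2 := separate_hemispheres macroscopic
  let microPairs := microscopic.map (fun k => (pvPart0 k, pvPart1 k))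
  let microPairs2 := PySem.List.sorted microPairs (fun t => t.1) false
  let microscopic2 :=
    ((pvGroupby microPairs2).foldl
      (fun d kg => d.insert kg.1 (kg.2.map (fun t => t.2), ["both"])) PySem.Dict.empty).items
  (macroscopic2, microscopic2)

-- ===== PORT B =====
-- Python's d[k] = f(d.get(k, dflt)) and d.setdefault(k, []).append(x) both keep the key's
-- position if present and append it otherwise: exactly PySem.Dict.modify.
-- Counts are Nats (Python's are non-negative ints); ['left'] * n is List.replicate n "left", exact for n ≥ 0.
def compute_parameters_alt (parameters : List String) : (List (String × List String × List String)) × (List (String × List String × List String)) :=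
  let acc :=
    parameters.foldl
      (fun (acc : PySem.Dict String (Bool × Nat × Nat) × PySem.Dict String (List String)) s =>
        if PySem.Str.isIn "." s then acc
        else if PySem.Str.isIn "|" s then
          (acc.1, acc.2.modify (pvPart0 s) [] (fun v => v ++ [s]))
        else if PySem.Str.endswith s "_left" then
          (acc.1.modify (PySem.Str.slice s none (some (-5))) (false, 0, 0)
            (fun t => (t.1, t.2.1 + 1, t.2.2)), acc.2)
        else if PySem.Str.endswith s "_right" then
          (acc.1.modify (PySem.Str.slice s none (some (-6))) (false, 0, 0)
            (fun t => (t.1, t.2.1, t.2.2 + 1)), acc.2)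
        else
          (acc.1.modify s (false, 0, 0) (fun t => (true, t.2.1, t.2.2)), acc.2))
      (PySem.Dict.empty, PySem.Dict.empty)
  let macroD := acc.1
  let microD := acc.2
  let rep := fun (name : String) =>
    let t := macroD.getD name (false, 0, 0)
    if t.1 then name else if 0 < t.2.1 then name ++ "_left" else name ++ "_right"
  -- both dict comprehensions iterate distinct keys, so the resulting dicts' items are these maps
  let macroscopic :=
    (PySem.List.sorted macroD.keys rep false).map (fun name =>
      let t := macroD.getD name (false, 0, 0)
      (name, (([] : List String),
        "both" :: (List.replicate t.2.1 "left" ++ List.replicate t.2.2 "right"))))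
  let microscopic :=
    (PySem.List.sorted microD.keys (fun k => k) false).map (fun k =>
      (k, ((PySem.List.sorted (microD.getD k []) (fun x => x) false).map pvPart1, ["both"])))
  (macroscopic, microscopic)

-- ===== PRECONDITION & SPEC =====
def Spec_compute_parameters (parameters : List String) (out : (List (String × List String × List String)) × (List (String × List String × List String))) : Prop := out = compute_parameters_alt parameters
instance (parameters : List String) (out : (List (String × List String × List String)) × (List (String × List String × List String))) : Decidable (Spec_compute_parameters parameters out) := by unfold Spec_compute_parameters; infer_instance

-- ===== CLAIM (what is proved, stated in full; the proofs are below) =====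
def Claim_equal_compute_parameters : Prop := ∀ (parameters : List String), Dom_compute_parameters parameters → Spec_compute_parameters parameters (compute_parameters parameters)


-- ===== LEMMAS AND PROOFS =====

-- proof-only helpers: the classification A and B both perform on a macroscopic parameter
def pvKey (s : String) : String :=
  if PySem.Str.endswith s "_left" then PySem.Str.slice s none (some (-5))
  else if PySem.Str.endswith s "_right" then PySem.Str.slice s none (some (-6)) else s

def pvTag (s : String) : List String :=
  if PySem.Str.endswith s "_left" then ["left"]
  else if PySem.Str.endswith s "_right" then ["right"] else []

-- per-key statistics of the macroscopic list (semantic form of B's accumulated dict)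
def pvIsL (s : String) : Bool := PySem.Str.endswith s "_left"
def pvIsR (s : String) : Bool := !PySem.Str.endswith s "_left" && PySem.Str.endswith s "_right"
def pvIsB (s : String) : Bool := !PySem.Str.endswith s "_left" && !PySem.Str.endswith s "_right"
def pvNL (m : List String) (k : String) : Nat := (m.filter (fun s => pvKey s == k && pvIsL s)).length
def pvNR (m : List String) (k : String) : Nat := (m.filter (fun s => pvKey s == k && pvIsR s)).length
def pvNB (m : List String) (k : String) : Nat := (m.filter (fun s => pvKey s == k && pvIsB s)).length
def pvRep (m : List String) (k : String) : String :=
  if 0 < pvNB m k then k else if 0 < pvNL m k then k ++ "_left" else k ++ "_right"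

-- ---- order facts about strings ----
theorem pv_lex_append (l x : List Char) (h : x ≠ []) : List.Lex (· < ·) l (l ++ x) := by
  induction l with
  | nil => cases x with | nil => simp at h | cons c t => exact List.Lex.nil
  | cons c t ih => exact List.Lex.cons ih

theorem pv_lex_append_left (l a b : List Char) (h : List.Lex (· < ·) a b) :
    List.Lex (· < ·) (l ++ a) (l ++ b) := by
  induction l with
  | nil => simpa
  | cons c t ih => exact List.Lex.cons ih

theorem pv_lt_append (s t : String) (h : t ≠ "") : s < s ++ t := by
  rw [String.lt_iff_toList_lt, String.toList_append]
  exact pv_lex_append _ _ (by simpa using h)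

theorem pv_lt_append_left (s : String) (a b : String) (h : List.Lex (· < ·) a.toList b.toList) :
    s ++ a < s ++ b := by
  rw [String.lt_iff_toList_lt, String.toList_append, String.toList_append]
  exact pv_lex_append_left _ _ _ h

theorem pv_lt_left (k : String) : k < k ++ "_left" := pv_lt_append _ _ (by decide)
theorem pv_lt_right (k : String) : k < k ++ "_right" := pv_lt_append _ _ (by decide)
theorem pv_lt_left_right (k : String) : k ++ "_left" < k ++ "_right" :=
  pv_lt_append_left _ _ _ (by decide)

-- ---- suffix / slice facts ----
theorem pv_endswith_iff (s p : String) :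
    PySem.Str.endswith s p = true ↔ p.toList <:+ s.toList := by
  rw [PySem.Str.endswith_eq]; exact PySem.Chars.endswith_iff _ _

theorem pv_endswith_append (k suf : String) : PySem.Str.endswith (k ++ suf) suf = true := by
  rw [pv_endswith_iff, String.toList_append]; exact List.suffix_append _ _

theorem pv_suffix_unique {l1 l2 L : List Char} (h1 : l1 <:+ L) (h2 : l2 <:+ L)
    (h : l1.length = l2.length) : l1 = l2 := by
  obtain ⟨a, ha⟩ := h1; obtain ⟨b, hb⟩ := h2
  exact (List.append_inj' (ha.trans hb.symm) h).2

theorem pv_endswith_right_not_left (k : String) :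
    PySem.Str.endswith (k ++ "_right") "_left" = false := by
  by_contra hc
  have h1 : ("_left".toList : List Char) <:+ (k ++ "_right").toList := by
    rw [← pv_endswith_iff]; revert hc; cases PySem.Str.endswith (k ++ "_right") "_left" <;> simp
  have h2 : ("right".toList : List Char) <:+ (k ++ "_right").toList := by
    rw [String.toList_append]
    exact List.IsSuffix.trans (by decide) (List.suffix_append _ _)
  have := pv_suffix_unique h1 h2 (by decide)
  simp at this

theorem pv_slice_cut (s pre suf : String) (hs : s.toList = pre.toList ++ suf.toList)
    (k : Nat) (hk : 1 < k) (hlen : suf.toList.length = k) :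
    PySem.Str.slice s none (some (-(k : Int))) = pre := by
  apply String.toList_inj.mp
  rw [PySem.Str.toList_slice, PySem.Chars.slice_eq_listSlice]
  rw [PySem.List.slice_to_neg_natCast _ _ (by omega)]
  rw [hs, List.length_append, hlen]
  simp

theorem pv_left_decomp (s : String) (h : PySem.Str.endswith s "_left" = true) :
    s = pvKey s ++ "_left" := by
  obtain ⟨pre, hpre⟩ := (pv_endswith_iff s "_left").mp h
  obtain ⟨p, hp⟩ : ∃ p : String, p.toList = pre := ⟨String.ofList pre, by simp⟩
  have hs : s.toList = p.toList ++ "_left".toList := by rw [hp, hpre]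
  have hk : pvKey s = p := by
    unfold pvKey; rw [if_pos h]
    have := pv_slice_cut s p "_left" hs 5 (by omega) (by decide)
    exact_mod_cast this
  rw [hk]
  exact String.toList_inj.mp (by rw [String.toList_append, hs])

theorem pv_right_decomp (s : String) (hL : PySem.Str.endswith s "_left" = false)
    (hR : PySem.Str.endswith s "_right" = true) : s = pvKey s ++ "_right" := by
  obtain ⟨pre, hpre⟩ := (pv_endswith_iff s "_right").mp hR
  obtain ⟨p, hp⟩ : ∃ p : String, p.toList = pre := ⟨String.ofList pre, by simp⟩
  have hs : s.toList = p.toList ++ "_right".toList := by rw [hp, hpre]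
  have hk : pvKey s = p := by
    unfold pvKey; rw [if_neg (by rw [hL]; simp), if_pos hR]
    have := pv_slice_cut s p "_right" hs 6 (by omega) (by decide)
    exact_mod_cast this
  rw [hk]
  exact String.toList_inj.mp (by rw [String.toList_append, hs])

theorem pv_key_bare (s : String) (hL : PySem.Str.endswith s "_left" = false)
    (hR : PySem.Str.endswith s "_right" = false) : pvKey s = s := by
  unfold pvKey; rw [if_neg (by rw [hL]; simp), if_neg (by rw [hR]; simp)]

theorem pvKey_append_left (k : String) : pvKey (k ++ "_left") = k := by
  have h := pv_endswith_append k "_left"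
  have := pv_left_decomp (k ++ "_left") h
  have h2 : (pvKey (k ++ "_left")).toList ++ "_left".toList = k.toList ++ "_left".toList := by
    rw [← String.toList_append, ← String.toList_append, ← this]
  exact String.toList_inj.mp (List.append_inj_left' h2 rfl)

theorem pvKey_append_right (k : String) : pvKey (k ++ "_right") = k := by
  have h := pv_endswith_append k "_right"
  have := pv_right_decomp (k ++ "_right") (pv_endswith_right_not_left k) h
  have h2 : (pvKey (k ++ "_right")).toList ++ "_right".toList = k.toList ++ "_right".toList := by
    rw [← String.toList_append, ← String.toList_append, ← this]
  exact String.toList_inj.mp (List.append_inj_left' h2 rfl)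

-- ---- category facts ----
theorem pv_cat_left (s : String) (h : pvIsL s = true) : s = pvKey s ++ "_left" :=
  pv_left_decomp s (by simpa [pvIsL] using h)

theorem pv_cat_right (s : String) (h : pvIsR s = true) : s = pvKey s ++ "_right" := by
  unfold pvIsR at h
  exact pv_right_decomp s (by revert h; cases PySem.Str.endswith s "_left" <;> simp)
    (by revert h; cases PySem.Str.endswith s "_right" <;> simp)

theorem pv_cat_bare (s : String) (h : pvIsB s = true) : pvKey s = s := by
  unfold pvIsB at h
  exact pv_key_bare s (by revert h; cases PySem.Str.endswith s "_left" <;> simp)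
    (by revert h; cases PySem.Str.endswith s "_right" <;> simp)

theorem pv_cat_total (s : String) : pvIsL s = true ∨ pvIsR s = true ∨ pvIsB s = true := by
  unfold pvIsL pvIsR pvIsB
  cases PySem.Str.endswith s "_left" <;> cases PySem.Str.endswith s "_right" <;> simp

-- ---- sorted/filter commute ----
theorem pv_sorted_filter (m : List String) (q : String → Bool) :
    (PySem.List.sorted m (fun x => x) false).filter q
      = PySem.List.sorted (m.filter q) (fun x => x) false := by
  apply PySem.List.eq_of_perm_of_pairwise_le_of_injective (fun x : String => x)
    (fun a b h => h)
  · exact ((PySem.List.sorted_perm m _ false).filter q).trans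
      (PySem.List.sorted_perm (m.filter q) _ false).symm
  · exact (PySem.List.sorted_pairwise m _).filter q
  · exact PySem.List.sorted_pairwise _ _

-- ---- first-occurrence dedup structure ----
theorem pv_ofList_cons (x : String) (xs : List String) :
    (PySem.Set.ofList (x :: xs) : List String)
      = x :: (PySem.Set.ofList xs : List String).filter (fun y => !(y == x)) := by
  rw [PySem.Set.ofList_cons]; rfl

theorem pv_ofList_filter (l : List String) (p : String → Bool) :
    (PySem.Set.ofList l : List String).filter p = PySem.Set.ofList (l.filter p) := by
  induction l with
  | nil => rfl
  | cons x t ih =>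
    cases hp : p x
    · rw [pv_ofList_cons]
      rw [show List.filter p (x :: t) = t.filter p from by rw [List.filter_cons_of_neg (by simp [hp])]]
      rw [show List.filter p (x :: (PySem.Set.ofList t : List String).filter (fun y => !(y == x)))
            = ((PySem.Set.ofList t : List String).filter (fun y => !(y == x))).filter p from by
          rw [List.filter_cons_of_neg (by simp [hp])]]
      rw [List.filter_filter, ← ih]
      apply List.filter_congr
      intro y _
      by_cases hyx : y = x
      · subst hyx; simp [hp]
      · simp [hyx]
    · rw [pv_ofList_cons]
      rw [show List.filter p (x :: t) = x :: t.filter p from by rw [List.filter_cons_of_pos (by simp [hp])]]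
      rw [pv_ofList_cons]
      rw [show List.filter p (x :: (PySem.Set.ofList t : List String).filter (fun y => !(y == x)))
            = x :: ((PySem.Set.ofList t : List String).filter (fun y => !(y == x))).filter p from by
          rw [List.filter_cons_of_pos (by simp [hp])]]
      congr 1
      rw [List.filter_filter, ← ih, List.filter_filter]
      apply List.filter_congr
      intro y _
      exact Bool.and_comm _ _

theorem pv_mem_ofList (l : List String) (y : String) :
    y ∈ (PySem.Set.ofList l : List String) ↔ y ∈ l := PySem.Set.mem_ofList l y

-- ---- dedup of a sorted key list is ordered by the representative ----
theorem pv_dedup_key_pairwise (n : Nat) :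
    ∀ (S : List String), S.length ≤ n → ∀ (f r : String → String),
      S.Pairwise (· ≤ ·) →
      (∀ s ∈ S, r (f s) ∈ S ∧ f (r (f s)) = f s ∧ ∀ t ∈ S, f t = f s → r (f s) ≤ t) →
      ((PySem.Set.ofList (S.map f) : List String)).Pairwise (fun a b => r a < r b) := by
  induction n with
  | zero =>
    intro S hlen f r _ _
    rw [List.length_eq_zero_iff.mp (Nat.le_zero.mp hlen)]
    exact List.Pairwise.nil
  | succ n ih =>
    intro S hlen f r hS hr
    match S with
    | [] => exact List.Pairwise.nil
    | s0 :: S' =>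
      rw [List.map_cons, pv_ofList_cons, pv_ofList_filter, List.filter_map]
      have hS' : S'.Pairwise (· ≤ ·) := hS.of_cons
      have hhead : ∀ t ∈ S', s0 ≤ t := (List.pairwise_cons.mp hS).1
      have hcomp : S'.filter ((fun y => !(y == f s0)) ∘ f) = S'.filter (fun t => !(f t == f s0)) := by
        apply List.filter_congr; intro t _; rfl
      rw [hcomp]
      have hTsub : ∀ t ∈ S'.filter (fun t => !(f t == f s0)), t ∈ S' ∧ f t ≠ f s0 := by
        intro t ht
        have := List.mem_filter.mp ht
        refine ⟨this.1, by simpa using this.2⟩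
      constructor
      · intro k hk
        have hk' : k ∈ (S'.filter (fun t => !(f t == f s0))).map f :=
          (pv_mem_ofList _ k).mp hk
        obtain ⟨t, htT, hft⟩ := List.mem_map.mp hk'
        obtain ⟨htS', htne⟩ := hTsub t htT
        have hrs0 := hr s0 (List.mem_cons_self)
        have hrt := hr t (List.mem_cons_of_mem _ htS')
        have h1 : r (f s0) ≤ s0 := hrs0.2.2 s0 (List.mem_cons_self) rfl
        have h2 : s0 ≤ r (f t) := by
          rcases List.mem_cons.mp hrt.1 with h | h
          · exfalso; apply htne; rw [← hrt.2.1, h]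
          · exact hhead _ h
        rw [← hft]
        rcases lt_or_eq_of_le (le_trans h1 h2) with h | h
        · exact h
        · exfalso; apply htne
          rw [← hrt.2.1, ← h, hrs0.2.1]
      · have hlenT : (S'.filter (fun t => !(f t == f s0))).length ≤ n := by
          have h1 : S'.length ≤ n := by simpa using hlen
          exact le_trans (List.length_filter_le _ _) h1
        refine ih _ hlenT f r (hS'.filter _) ?_
        intro t ht
        obtain ⟨htS', htne⟩ := hTsub t ht
        have hrt := hr t (List.mem_cons_of_mem _ htS')
        have hmem : r (f t) ∈ S'.filter (fun t => !(f t == f s0)) := by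
          rcases List.mem_cons.mp hrt.1 with h | h
          · exfalso; apply htne; rw [← hrt.2.1, h]
          · apply List.mem_filter.mpr
            refine ⟨h, by simp [hrt.2.1, htne]⟩
        exact ⟨hmem, hrt.2.1, fun u hu hfu =>
          hrt.2.2 u (List.mem_cons_of_mem _ ((hTsub u hu).1)) hfu⟩

-- ---- stability of the (insertion) sort ----
theorem pv_pairwise_insertBy {α : Type} (key : α → String) (x : α) (ys : List α)
    (h : ys.Pairwise (fun a b => key a ≤ key b)) :
    (PySem.List.insertBy (fun a b => decide (key a < key b)) x ys).Pairwise
      (fun a b => key a ≤ key b) := by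
  induction ys with
  | nil => exact List.pairwise_singleton _ _
  | cons y t ih =>
    rw [show PySem.List.insertBy (fun a b => decide (key a < key b)) x (y :: t)
        = if decide (key x < key y) then x :: y :: t
          else y :: PySem.List.insertBy (fun a b => decide (key a < key b)) x t from rfl]
    by_cases hxy : key x < key y
    · rw [if_pos (by simpa using hxy)]
      constructor
      · intro z hz
        rcases List.mem_cons.mp hz with rfl | hz'
        · exact le_of_lt hxy
        · exact le_trans (le_of_lt hxy) ((List.pairwise_cons.mp h).1 z hz')
      · exact h
    · rw [if_neg (by simpa using hxy)]
      constructor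
      · intro z hz
        rcases (PySem.List.mem_insertBy _ _ _ _).mp hz with rfl | hz'
        · exact le_of_not_gt hxy
        · exact (List.pairwise_cons.mp h).1 z hz'
      · exact ih h.of_cons

theorem pv_filter_insertBy {α : Type} (key : α → String) (k : String) (x : α) (ys : List α)
    (h : ys.Pairwise (fun a b => key a ≤ key b)) :
    (PySem.List.insertBy (fun a b => decide (key a < key b)) x ys).filter (fun t => key t == k)
      = if key x == k then ys.filter (fun t => key t == k) ++ [x]
        else ys.filter (fun t => key t == k) := by
  induction ys with
  | nil => cases hxk : key x == k <;> simp [PySem.List.insertBy, hxk]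
  | cons y t ih =>
    rw [show PySem.List.insertBy (fun a b => decide (key a < key b)) x (y :: t)
        = if decide (key x < key y) then x :: y :: t
          else y :: PySem.List.insertBy (fun a b => decide (key a < key b)) x t from rfl]
    by_cases hxy : key x < key y
    · rw [if_pos (by simpa using hxy)]
      have hnil : ∀ z ∈ (y :: t), key x < key z := by
        intro z hz
        rcases List.mem_cons.mp hz with rfl | hz'
        · exact hxy
        · exact lt_of_lt_of_le hxy ((List.pairwise_cons.mp h).1 z hz')
      by_cases hxk : key x = k
      · have hfil : (y :: t).filter (fun t => key t == k) = [] := by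
          apply List.filter_eq_nil_iff.mpr
          intro z hz
          have := hnil z hz
          simp only [beq_iff_eq]
          intro hzk
          rw [hxk] at this; rw [hzk] at this; exact lt_irrefl _ this
        rw [List.filter_cons_of_pos (by simp [hxk]), hfil, if_pos (by simp [hxk])]
        simp
      · rw [List.filter_cons_of_neg (by simp [hxk]), if_neg (by simp [hxk])]
    · rw [if_neg (by simpa using hxy), List.filter_cons, ih h.of_cons]
      cases hyk : key y == k <;> cases hxk : key x == k <;>
        simp [List.filter_cons, hyk, hxk]

theorem pv_sorted_filter_key {α : Type} (key : α → String) (l : List α) (k : String) :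
    (PySem.List.sorted l key false).filter (fun t => key t == k)
      = l.filter (fun t => key t == k) := by
  rw [PySem.List.sorted_eq_foldl_insertBy]
  suffices h : ∀ (acc : List α), acc.Pairwise (fun a b => key a ≤ key b) →
      (l.foldl (fun acc x => PySem.List.insertBy (fun a b => decide (key a < key b)) x acc)
        acc).filter (fun t => key t == k)
      = acc.filter (fun t => key t == k) ++ l.filter (fun t => key t == k) by
    simpa using h [] List.Pairwise.nil
  induction l with
  | nil => intro acc _; simp
  | cons x t ih =>
    intro acc hacc
    rw [List.foldl_cons, ih _ (pv_pairwise_insertBy key x acc hacc),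
      pv_filter_insertBy key k x acc hacc, List.filter_cons]
    cases hxk : key x == k <;> simp

-- ---- dict value folds ----
theorem pv_getD_foldl_modify {α : Type} (key : α → String) (val : α → List String)
    (l : List α) (d : PySem.Dict String (List String)) (c : String) :
    (l.foldl (fun d x => d.modify (key x) [] (fun v => v ++ val x)) d).getD c []
      = d.getD c [] ++ (l.filter (fun x => key x == c)).flatMap val := by
  induction l generalizing d with
  | nil => simp
  | cons x t ih =>
    rw [List.foldl_cons, ih, PySem.Dict.getD_modify, List.filter_cons]
    by_cases h : c = key x
    · subst h
      simp [List.append_assoc]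
    · rw [if_neg h, show (key x == c) = false from beq_eq_false_iff_ne.mpr (fun he => h he.symm)]
      simp

def pvUpd (s : String) : Bool × Nat × Nat → Bool × Nat × Nat := fun t =>
  if PySem.Str.endswith s "_left" then (t.1, t.2.1 + 1, t.2.2)
  else if PySem.Str.endswith s "_right" then (t.1, t.2.1, t.2.2 + 1)
  else (true, t.2.1, t.2.2)

theorem pv_getD_foldl_macro (l : List String) (d : PySem.Dict String (Bool × Nat × Nat))
    (c : String) :
    (l.foldl (fun d s => d.modify (pvKey s) (false, 0, 0) (pvUpd s)) d).getD c (false, 0, 0)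
      = ((d.getD c (false, 0, 0)).1 || decide (0 < pvNB l c),
         (d.getD c (false, 0, 0)).2.1 + pvNL l c,
         (d.getD c (false, 0, 0)).2.2 + pvNR l c) := by
  induction l generalizing d with
  | nil => simp [pvNB, pvNL, pvNR]
  | cons x t ih =>
    rw [List.foldl_cons, ih, PySem.Dict.getD_modify]
    unfold pvNB pvNL pvNR
    rw [List.filter_cons, List.filter_cons, List.filter_cons]
    by_cases h : c = pvKey x
    · subst h
      rw [if_pos rfl, show (pvKey x == pvKey x) = true from by simp]
      unfold pvUpd pvIsB pvIsL pvIsR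
      cases hL : PySem.Str.endswith x "_left" <;> cases hR : PySem.Str.endswith x "_right" <;>
        · refine Prod.ext ?_ (Prod.ext ?_ ?_) <;>
            simp [hL, hR, List.length_cons] <;> omega
    · rw [if_neg h,
        show (pvKey x == c) = false from beq_eq_false_iff_ne.mpr (fun he => h he.symm)]
      simp

-- ---- replicate helpers ----
theorem pv_flatMap_replicate (n : Nat) (a : String) (f : String → List String) :
    (List.replicate n a).flatMap f = (List.replicate n (f a)).flatten := by
  induction n with
  | zero => rfl
  | succ n ih => simp [List.replicate_succ, ih]

theorem pv_flatten_replicate_nil (n : Nat) :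
    (List.replicate n ([] : List String)).flatten = [] := by
  induction n with
  | zero => rfl
  | succ n ih => simp [List.replicate_succ, ih]

theorem pv_flatten_replicate_singleton (n : Nat) (x : String) :
    (List.replicate n [x]).flatten = List.replicate n x := by
  induction n with
  | zero => rfl
  | succ n ih => simp [List.replicate_succ, ih]

-- ---- groupby characterization on key-sorted input ----
theorem pv_takeWhile_filter {α : Type} (g : α → String) (c : String) (l : List α)
    (hall : ∀ x ∈ l, c ≤ g x) (hp : (l.map g).Pairwise (· ≤ ·)) :
    l.takeWhile (fun t => g t == c) = l.filter (fun t => g t == c)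
    ∧ l.dropWhile (fun t => g t == c) = l.filter (fun t => !(g t == c)) := by
  induction l with
  | nil => simp
  | cons x t ih =>
    by_cases hx : g x = c
    · have htail := ih (fun z hz => hall z (List.mem_cons_of_mem _ hz))
        (by rw [List.map_cons] at hp; exact hp.of_cons)
      constructor
      · rw [List.takeWhile_cons_of_pos (by simp [hx]), List.filter_cons_of_pos (by simp [hx]),
          htail.1]
      · rw [List.dropWhile_cons_of_pos (by simp [hx]), List.filter_cons_of_neg (by simp [hx]),
          htail.2]
    · have hlt : c < g x := lt_of_le_of_ne (hall x List.mem_cons_self) (fun he => hx he.symm)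
      have hge : ∀ z ∈ t, g x ≤ g z := by
        intro z hz
        exact (List.pairwise_cons.mp (by rw [List.map_cons] at hp; exact hp)).1 (g z)
          (List.mem_map_of_mem hz)
      constructor
      · rw [List.takeWhile_cons_of_neg (by simp [hx])]
        symm
        apply List.filter_eq_nil_iff.mpr
        intro z hz
        rcases List.mem_cons.mp hz with rfl | hz'
        · simp [hx]
        · have := lt_of_lt_of_le hlt (hge z hz')
          simp only [beq_iff_eq]
          intro hzk; rw [hzk] at this; exact lt_irrefl _ this
      · rw [List.dropWhile_cons_of_neg (by simp [hx]), List.filter_cons_of_pos (by simp [hx])]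
        congr 1
        symm
        apply List.filter_eq_self.mpr
        intro z hz'
        have := lt_of_lt_of_le hlt (hge z hz')
        simp only [Bool.not_eq_eq_eq_not, Bool.not_true, beq_eq_false_iff_ne, ne_eq]
        intro hzk; rw [hzk] at this; exact lt_irrefl _ this

theorem pv_groupby_char (n : Nat) : ∀ (P : List (String × String)), P.length ≤ n →
    (P.map (fun t => t.1)).Pairwise (· ≤ ·) →
    pvGroupby P = ((PySem.Set.ofList (P.map (fun t => t.1)) : List String)).map
      (fun k => (k, P.filter (fun t => t.1 == k))) := by
  induction n with
  | zero =>
    intro P hlen _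
    rw [List.length_eq_zero_iff.mp (Nat.le_zero.mp hlen), pvGroupby]
    rfl
  | succ n ih =>
    intro P hlen hp
    match P with
    | [] => rw [pvGroupby]; rfl
    | (k, v) :: rest =>
      have hall : ∀ x ∈ rest, k ≤ x.1 := by
        intro x hx
        exact (List.pairwise_cons.mp (by rw [List.map_cons] at hp; exact hp)).1 x.1
          (List.mem_map_of_mem hx)
      have htail : (rest.map (fun t => t.1)).Pairwise (· ≤ ·) := by
        rw [List.map_cons] at hp; exact hp.of_cons
      obtain ⟨htw, hdw⟩ := pv_takeWhile_filter (fun t => t.1) k rest hall htail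
      rw [pvGroupby, htw, hdw]
      rw [List.map_cons, pv_ofList_cons, pv_ofList_filter, List.filter_map]
      have hcomp : rest.filter ((fun y => !(y == k)) ∘ (fun t => t.1))
          = rest.filter (fun t => !(t.1 == k)) := by
        apply List.filter_congr; intro t _; rfl
      rw [hcomp, List.map_cons]
      congr 1
      · rw [List.filter_cons_of_pos (by simp)]
      · rw [ih _ (le_trans (List.length_filter_le _ _) (by simpa using hlen))
          (by
            have hsub : List.Sublist ((rest.filter (fun t => !(t.1 == k))).map (fun t => t.1))
                (rest.map (fun t => t.1)) := List.Sublist.map _ List.filter_sublist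
            exact htail.sublist hsub)]
        apply List.map_congr_left
        intro k' hk'
        have hk'' : k' ∈ (rest.filter (fun t => !(t.1 == k))).map (fun t => t.1) :=
          (pv_mem_ofList _ k').mp hk'
        obtain ⟨t, htmem, hft⟩ := List.mem_map.mp hk''
        have htne : t.1 ≠ k := by simpa using (List.mem_filter.mp htmem).2
        have hkne : k' ≠ k := by rw [← hft]; exact htne
        congr 1
        rw [List.filter_cons_of_neg (by simp only [beq_iff_eq]; exact fun he => hkne he.symm), List.filter_filter]
        apply List.filter_congr
        intro u _
        cases hu : u.1 == k' <;> simp_all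

-- ---- macroscopic bucket: sorted values of one key are lefts then rights ----
theorem pv_IsL_notB (s : String) : (pvIsL s && !pvIsB s) = pvIsL s := by
  unfold pvIsL pvIsB
  cases PySem.Str.endswith s "_left" <;> cases PySem.Str.endswith s "_right" <;> rfl

theorem pv_notL_notB (s : String) : (!pvIsL s && !pvIsB s) = pvIsR s := by
  unfold pvIsL pvIsR pvIsB
  cases PySem.Str.endswith s "_left" <;> cases PySem.Str.endswith s "_right" <;> rfl

theorem pv_bucket_perm (m : List String) (k : String) :
    (m.filter (fun s => pvKey s == k)).Perm
      ((m.filter (fun s => pvKey s == k)).filter pvIsB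
        ++ ((m.filter (fun s => pvKey s == k)).filter pvIsL
            ++ (m.filter (fun s => pvKey s == k)).filter pvIsR)) := by
  set bkt := m.filter (fun s => pvKey s == k) with hbkt
  have h1 : (bkt.filter pvIsB ++ bkt.filter (fun s => !pvIsB s)).Perm bkt :=
    List.filter_append_perm _ _
  have h2 : ((bkt.filter (fun s => !pvIsB s)).filter pvIsL
      ++ (bkt.filter (fun s => !pvIsB s)).filter (fun s => !pvIsL s)).Perm
      (bkt.filter (fun s => !pvIsB s)) := List.filter_append_perm _ _
  have e1 : (bkt.filter (fun s => !pvIsB s)).filter pvIsL = bkt.filter pvIsL := by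
    rw [List.filter_filter]
    apply List.filter_congr
    intro s _
    exact pv_IsL_notB s
  have e2 : (bkt.filter (fun s => !pvIsB s)).filter (fun s => !pvIsL s) = bkt.filter pvIsR := by
    rw [List.filter_filter]
    apply List.filter_congr
    intro s _
    exact pv_notL_notB s
  rw [e1, e2] at h2
  exact (h1.symm.trans ((h2.symm).append_left (bkt.filter pvIsB))).symm.symm

theorem pv_filter_filter_cat (m : List String) (k : String) (c : String → Bool) :
    (m.filter (fun s => pvKey s == k)).filter c
      = m.filter (fun s => pvKey s == k && c s) := by
  rw [List.filter_filter]
  apply List.filter_congr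
  intro s _
  exact Bool.and_comm _ _

theorem pv_bucket_B (m : List String) (k : String) :
    (m.filter (fun s => pvKey s == k)).filter pvIsB = List.replicate (pvNB m k) k := by
  apply List.eq_replicate_iff.mpr
  constructor
  · rw [pv_filter_filter_cat]; rfl
  · intro b hb
    have h := List.mem_filter.mp hb
    have h2 := List.mem_filter.mp h.1
    have hk : pvKey b = k := by simpa using h2.2
    rw [← hk]
    exact (pv_cat_bare b h.2).symm

theorem pv_bucket_L (m : List String) (k : String) :
    (m.filter (fun s => pvKey s == k)).filter pvIsL
      = List.replicate (pvNL m k) (k ++ "_left") := by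
  apply List.eq_replicate_iff.mpr
  constructor
  · rw [pv_filter_filter_cat]; rfl
  · intro b hb
    have h := List.mem_filter.mp hb
    have h2 := List.mem_filter.mp h.1
    have hk : pvKey b = k := by simpa using h2.2
    rw [← hk]
    exact pv_cat_left b h.2

theorem pv_bucket_R (m : List String) (k : String) :
    (m.filter (fun s => pvKey s == k)).filter pvIsR
      = List.replicate (pvNR m k) (k ++ "_right") := by
  apply List.eq_replicate_iff.mpr
  constructor
  · rw [pv_filter_filter_cat]; rfl
  · intro b hb
    have h := List.mem_filter.mp hb
    have h2 := List.mem_filter.mp h.1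
    have hk : pvKey b = k := by simpa using h2.2
    rw [← hk]
    exact pv_cat_right b h.2

theorem pv_sorted_bucket (m : List String) (k : String) :
    PySem.List.sorted (m.filter (fun s => pvKey s == k)) (fun x => x) false
      = List.replicate (pvNB m k) k
        ++ (List.replicate (pvNL m k) (k ++ "_left")
            ++ List.replicate (pvNR m k) (k ++ "_right")) := by
  apply PySem.List.eq_of_perm_of_pairwise_le_of_injective (fun x : String => x) (fun a b h => h)
  · exact (PySem.List.sorted_perm _ _ _).trans
      (by rw [← pv_bucket_B, ← pv_bucket_L, ← pv_bucket_R]; exact pv_bucket_perm m k)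
  · exact PySem.List.sorted_pairwise _ _
  · apply List.pairwise_append.mpr
    refine ⟨List.pairwise_replicate.mpr (Or.inr le_rfl), ?_, ?_⟩
    · apply List.pairwise_append.mpr
      refine ⟨List.pairwise_replicate.mpr (Or.inr le_rfl),
        List.pairwise_replicate.mpr (Or.inr le_rfl), ?_⟩
      intro a ha b hb
      rw [List.eq_of_mem_replicate ha, List.eq_of_mem_replicate hb]
      exact le_of_lt (pv_lt_left_right k)
    · intro a ha b hb
      rw [List.eq_of_mem_replicate ha]
      rcases List.mem_append.mp hb with hb | hb
      · rw [List.eq_of_mem_replicate hb]; exact le_of_lt (pv_lt_left k)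
      · rw [List.eq_of_mem_replicate hb]; exact le_of_lt (pv_lt_right k)

theorem pv_tag_left (k : String) : pvTag (k ++ "_left") = ["left"] := by
  unfold pvTag
  rw [if_pos (pv_endswith_append k "_left")]

theorem pv_tag_right (k : String) : pvTag (k ++ "_right") = ["right"] := by
  unfold pvTag
  rw [if_neg (by rw [pv_endswith_right_not_left k]; simp),
    if_pos (pv_endswith_append k "_right")]

theorem pv_bucket_flat (m : List String) (k : String) :
    ((PySem.List.sorted m (fun x => x) false).filter (fun s => pvKey s == k)).flatMap pvTag
      = List.replicate (pvNL m k) "left" ++ List.replicate (pvNR m k) "right" := by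
  rw [pv_sorted_filter m (fun s => pvKey s == k), pv_sorted_bucket,
    List.flatMap_append, List.flatMap_append]
  have hB : (List.replicate (pvNB m k) k).flatMap pvTag = [] := by
    rcases Nat.eq_zero_or_pos (pvNB m k) with h | h
    · rw [h]; rfl
    · have hex : ∃ s, s ∈ m.filter (fun s => pvKey s == k && pvIsB s) := by
        apply List.exists_mem_of_length_pos
        exact h
      obtain ⟨s, hs⟩ := hex
      have h1 := List.mem_filter.mp hs
      have hk : pvKey s = k := by
        have := h1.2; simp only [Bool.and_eq_true, beq_iff_eq] at this; exact this.1
      have hb : pvIsB s = true := by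
        have := h1.2; simp only [Bool.and_eq_true] at this; exact this.2
      have hsk : s = k := by rw [← hk]; exact (pv_cat_bare s hb).symm
      have htag : pvTag k = [] := by
        rw [← hsk]
        unfold pvIsB at hb
        unfold pvTag
        rcases Bool.and_eq_true_iff.mp hb with ⟨hL, hR⟩
        rw [if_neg (by simpa using hL), if_neg (by simpa using hR)]
      rw [pv_flatMap_replicate, htag, pv_flatten_replicate_nil]
  rw [hB, pv_flatMap_replicate, pv_tag_left, pv_flatten_replicate_singleton,
    pv_flatMap_replicate, pv_tag_right, pv_flatten_replicate_singleton]
  simp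

-- ---- dict keys of the two accumulation folds ----
theorem pv_update_nil (xs : List String) :
    PySem.Set.update ([] : PySem.Set String) xs = PySem.Set.ofList xs := by
  simp [PySem.Set.update_eq_append_filter]

theorem pv_keys_tagfold (xs : List String) :
    ((xs.foldl (fun d p => d.modify (pvKey p) [] (fun v => v ++ pvTag p))
      (PySem.Dict.empty : PySem.Dict String (List String)))).keys
      = PySem.Set.ofList (xs.map pvKey) := by
  have h := PySem.Dict.keys_foldl_modify_key xs pvKey [] (fun _ p => fun v => v ++ pvTag p)
    PySem.Dict.empty
  rw [h, PySem.Dict.keys_empty, pv_update_nil]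

theorem pv_keys_macfold (xs : List String) :
    ((xs.foldl (fun d s => d.modify (pvKey s) (false, 0, 0) (pvUpd s))
      (PySem.Dict.empty : PySem.Dict String (Bool × Nat × Nat)))).keys
      = PySem.Set.ofList (xs.map pvKey) := by
  have h := PySem.Dict.keys_foldl_modify_key xs pvKey (false, 0, 0) (fun _ s => pvUpd s)
    PySem.Dict.empty
  rw [h, PySem.Dict.keys_empty, pv_update_nil]

theorem pv_keys_micfold (xs : List String) :
    ((xs.foldl (fun d s => d.modify (pvPart0 s) [] (fun v => v ++ [s]))
      (PySem.Dict.empty : PySem.Dict String (List String)))).keys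
      = PySem.Set.ofList (xs.map pvPart0) := by
  have h := PySem.Dict.keys_foldl_modify_key xs pvPart0 [] (fun _ s => fun v => v ++ [s])
    PySem.Dict.empty
  rw [h, PySem.Dict.keys_empty, pv_update_nil]

-- ---- representative facts ----
theorem pv_NB_pos_iff (m : List String) (k : String) :
    0 < pvNB m k ↔ ∃ s ∈ m, pvKey s = k ∧ pvIsB s = true := by
  unfold pvNB
  rw [List.length_pos_iff_exists_mem]
  constructor
  · rintro ⟨s, hs⟩
    have h := List.mem_filter.mp hs
    have := h.2; simp only [Bool.and_eq_true, beq_iff_eq] at this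
    exact ⟨s, h.1, this.1, this.2⟩
  · rintro ⟨s, hm, hk, hc⟩
    exact ⟨s, List.mem_filter.mpr ⟨hm, by simp [hk, hc]⟩⟩

theorem pv_NL_pos_iff (m : List String) (k : String) :
    0 < pvNL m k ↔ ∃ s ∈ m, pvKey s = k ∧ pvIsL s = true := by
  unfold pvNL
  rw [List.length_pos_iff_exists_mem]
  constructor
  · rintro ⟨s, hs⟩
    have h := List.mem_filter.mp hs
    have := h.2; simp only [Bool.and_eq_true, beq_iff_eq] at this
    exact ⟨s, h.1, this.1, this.2⟩
  · rintro ⟨s, hm, hk, hc⟩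
    exact ⟨s, List.mem_filter.mpr ⟨hm, by simp [hk, hc]⟩⟩

theorem pv_NR_pos_iff (m : List String) (k : String) :
    0 < pvNR m k ↔ ∃ s ∈ m, pvKey s = k ∧ pvIsR s = true := by
  unfold pvNR
  rw [List.length_pos_iff_exists_mem]
  constructor
  · rintro ⟨s, hs⟩
    have h := List.mem_filter.mp hs
    have := h.2; simp only [Bool.and_eq_true, beq_iff_eq] at this
    exact ⟨s, h.1, this.1, this.2⟩
  · rintro ⟨s, hm, hk, hc⟩
    exact ⟨s, List.mem_filter.mpr ⟨hm, by simp [hk, hc]⟩⟩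

theorem pv_rep_spec (m : List String) :
    ∀ s ∈ PySem.List.sorted m (fun x => x) false,
      pvRep m (pvKey s) ∈ PySem.List.sorted m (fun x => x) false
      ∧ pvKey (pvRep m (pvKey s)) = pvKey s
      ∧ ∀ t ∈ PySem.List.sorted m (fun x => x) false,
          pvKey t = pvKey s → pvRep m (pvKey s) ≤ t := by
  intro s hs
  rw [PySem.List.mem_sorted] at hs
  set k := pvKey s with hk
  have hmem : ∀ x, x ∈ PySem.List.sorted m (fun y => y) false ↔ x ∈ m := by
    intro x; exact PySem.List.mem_sorted m _ false x
  have hrepmem : pvRep m k ∈ m ∧ pvKey (pvRep m k) = k := by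
    unfold pvRep
    by_cases h1 : 0 < pvNB m k
    · rw [if_pos h1]
      obtain ⟨u, hu, huk, hub⟩ := (pv_NB_pos_iff m k).mp h1
      have : u = k := by rw [← huk]; exact (pv_cat_bare u hub).symm
      subst this
      exact ⟨hu, huk⟩
    · rw [if_neg h1]
      by_cases h2 : 0 < pvNL m k
      · rw [if_pos h2]
        obtain ⟨u, hu, huk, hul⟩ := (pv_NL_pos_iff m k).mp h2
        have : u = k ++ "_left" := by rw [← huk]; exact pv_cat_left u hul
        subst this
        exact ⟨hu, pvKey_append_left k⟩
      · rw [if_neg h2]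
        have h3 : 0 < pvNR m k := by
          rcases pv_cat_total s with hc | hc | hc
          · exact absurd ((pv_NL_pos_iff m k).mpr ⟨s, hs, rfl, hc⟩) h2
          · exact (pv_NR_pos_iff m k).mpr ⟨s, hs, rfl, hc⟩
          · exact absurd ((pv_NB_pos_iff m k).mpr ⟨s, hs, rfl, hc⟩) h1
        obtain ⟨u, hu, huk, hur⟩ := (pv_NR_pos_iff m k).mp h3
        have : u = k ++ "_right" := by rw [← huk]; exact pv_cat_right u hur
        subst this
        exact ⟨hu, pvKey_append_right k⟩
  refine ⟨(hmem _).mpr hrepmem.1, hrepmem.2, ?_⟩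
  intro t ht htk
  rw [hmem] at ht
  have hrle : pvRep m k ≤ k ∨ pvRep m k = k ++ "_left" ∨ pvRep m k = k ++ "_right" := by
    unfold pvRep
    by_cases h1 : 0 < pvNB m k
    · rw [if_pos h1]; exact Or.inl le_rfl
    · rw [if_neg h1]
      by_cases h2 : 0 < pvNL m k
      · rw [if_pos h2]; exact Or.inr (Or.inl rfl)
      · rw [if_neg h2]; exact Or.inr (Or.inr rfl)
  rcases pv_cat_total t with hc | hc | hc
  · -- t ends with _left, so t = k ++ "_left" and the bare case cannot choose _right
    have htv : t = k ++ "_left" := by rw [← htk]; exact pv_cat_left t hc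
    have h2 : 0 < pvNL m k := (pv_NL_pos_iff m k).mpr ⟨t, ht, htk, hc⟩
    unfold pvRep
    by_cases h1 : 0 < pvNB m k
    · rw [if_pos h1, htv]; exact le_of_lt (pv_lt_left k)
    · rw [if_neg h1, if_pos h2, htv]
  · have htv : t = k ++ "_right" := by rw [← htk]; exact pv_cat_right t hc
    rcases hrle with h | h | h
    · exact le_trans h (by rw [htv]; exact le_of_lt (pv_lt_right k))
    · rw [h, htv]; exact le_of_lt (pv_lt_left_right k)
    · rw [h, htv]
  · have htv : t = k := by rw [← htk]; exact (pv_cat_bare t hc).symm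
    have h1 : 0 < pvNB m k := (pv_NB_pos_iff m k).mpr ⟨t, ht, htk, hc⟩
    unfold pvRep
    rw [if_pos h1, htv]

theorem pv_keys_sorted (m : List String) :
    PySem.List.sorted ((PySem.Set.ofList (m.map pvKey)) : List String) (pvRep m) false
      = (PySem.Set.ofList ((PySem.List.sorted m (fun x => x) false).map pvKey) : List String) := by
  apply PySem.List.sorted_eq_of_perm_of_pairwise_lt
  · apply (List.perm_ext_iff_of_nodup (PySem.Set.nodup_ofList _) (PySem.Set.nodup_ofList _)).mpr
    intro a
    rw [pv_mem_ofList, pv_mem_ofList, List.mem_map, List.mem_map]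
    constructor
    · rintro ⟨x, hx, rfl⟩
      exact ⟨x, (PySem.List.mem_sorted m _ false x).mp hx, rfl⟩
    · rintro ⟨x, hx, rfl⟩
      exact ⟨x, (PySem.List.mem_sorted m _ false x).mpr hx, rfl⟩
  · exact pv_dedup_key_pairwise (PySem.List.sorted m (fun x => x) false).length
      _ le_rfl pvKey (pvRep m) (PySem.List.sorted_pairwise _ _) (pv_rep_spec m)

-- ---- items of the comprehension folds ----
theorem pv_items_empty {ν : Type} : (PySem.Dict.empty : PySem.Dict String ν).items = [] := rfl

theorem pv_items_fold_sep (l : List (String × List String)) (hnd : (l.map (fun kv => kv.1)).Nodup) :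
    ((l.foldl (fun d kv => d.insert kv.1 (([] : List String), ("both" :: kv.2 : List String)))
      (PySem.Dict.empty : PySem.Dict String (List String × List String))).items)
      = l.map (fun kv => (kv.1, ([], "both" :: kv.2))) := by
  have h := PySem.Dict.items_foldl_insert_fresh l (fun kv => kv.1)
    (fun kv => (([] : List String), ("both" :: kv.2 : List String))) PySem.Dict.empty
    (fun a _ => PySem.Dict.contains_empty _) hnd
  rw [h, pv_items_empty, List.nil_append]

theorem pv_items_fold_grp (l : List (String × List (String × String)))
    (hnd : (l.map (fun kg => kg.1)).Nodup) :
    ((l.foldl (fun d kg => d.insert kg.1 ((kg.2.map (fun t => t.2) : List String), (["both"] : List String)))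
      (PySem.Dict.empty : PySem.Dict String (List String × List String))).items)
      = l.map (fun kg => (kg.1, (kg.2.map (fun t => t.2), ["both"]))) := by
  have h := PySem.Dict.items_foldl_insert_fresh l (fun kg => kg.1)
    (fun kg => ((kg.2.map (fun t => t.2) : List String), (["both"] : List String))) PySem.Dict.empty
    (fun a _ => PySem.Dict.contains_empty _) hnd
  rw [h, pv_items_empty, List.nil_append]

theorem pv_nodup_keys_tagfold (xs : List String) :
    ((xs.foldl (fun d p => d.modify (pvKey p) [] (fun v => v ++ pvTag p))
      (PySem.Dict.empty : PySem.Dict String (List String)))).keys.Nodup :=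
  PySem.Dict.nodup_keys_foldl_modify_key xs pvKey [] (fun _ p => fun v => v ++ pvTag p)
    PySem.Dict.empty PySem.Dict.nodup_keys_empty

theorem pv_items_tagfold (xs : List String) :
    ((xs.foldl (fun d p => d.modify (pvKey p) [] (fun v => v ++ pvTag p))
      (PySem.Dict.empty : PySem.Dict String (List String)))).items
      = (PySem.Set.ofList (xs.map pvKey) : List String).map
          (fun k => (k, (xs.filter (fun s => pvKey s == k)).flatMap pvTag)) := by
  rw [PySem.Dict.items_eq_map_keys _ (pv_nodup_keys_tagfold xs) [], pv_keys_tagfold]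
  apply List.map_congr_left
  intro k _
  rw [pv_getD_foldl_modify pvKey pvTag xs PySem.Dict.empty k, PySem.Dict.getD_empty,
    List.nil_append]

-- ---- the two accumulated dict lookups, in closed form ----
theorem pv_macroD_getD (m : List String) (c : String) :
    ((m.foldl (fun d s => d.modify (pvKey s) (false, 0, 0) (pvUpd s))
      (PySem.Dict.empty : PySem.Dict String (Bool × Nat × Nat))).getD c (false, 0, 0))
      = (decide (0 < pvNB m c), pvNL m c, pvNR m c) := by
  rw [pv_getD_foldl_macro, PySem.Dict.getD_empty]
  simp

theorem pv_microD_getD (l : List String) (c : String) :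
    ((l.foldl (fun d s => d.modify (pvPart0 s) [] (fun v => v ++ [s]))
      (PySem.Dict.empty : PySem.Dict String (List String))).getD c [])
      = l.filter (fun s => pvPart0 s == c) := by
  rw [pv_getD_foldl_modify pvPart0 (fun s => [s]) l PySem.Dict.empty c, PySem.Dict.getD_empty,
    List.nil_append]
  exact List.flatMap_singleton' _

-- ---- step-function congruences ----
theorem pv_stepA_eq :
    (fun (d : PySem.Dict String (List String)) param =>
      if PySem.Str.endswith param "_left" then
        d.modify (PySem.Str.slice param none (some (-5))) [] (fun v => v ++ ["left"])
      else if PySem.Str.endswith param "_right" then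
        d.modify (PySem.Str.slice param none (some (-6))) [] (fun v => v ++ ["right"])
      else d.modify param [] (fun v => v ++ []))
    = fun d param => d.modify (pvKey param) [] (fun v => v ++ pvTag param) := by
  funext d p
  unfold pvKey pvTag
  by_cases hL : PySem.Str.endswith p "_left"
  · rw [if_pos hL, if_pos hL, if_pos hL]
  · rw [if_neg hL, if_neg hL, if_neg hL]
    by_cases hR : PySem.Str.endswith p "_right"
    · rw [if_pos hR, if_pos hR, if_pos hR]
    · rw [if_neg hR, if_neg hR, if_neg hR]

theorem pv_stepB_eq :
    (fun (acc : PySem.Dict String (Bool × Nat × Nat) × PySem.Dict String (List String)) s =>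
        if PySem.Str.isIn "." s then acc
        else if PySem.Str.isIn "|" s then
          (acc.1, acc.2.modify (pvPart0 s) [] (fun v => v ++ [s]))
        else if PySem.Str.endswith s "_left" then
          (acc.1.modify (PySem.Str.slice s none (some (-5))) (false, 0, 0)
            (fun t => (t.1, t.2.1 + 1, t.2.2)), acc.2)
        else if PySem.Str.endswith s "_right" then
          (acc.1.modify (PySem.Str.slice s none (some (-6))) (false, 0, 0)
            (fun t => (t.1, t.2.1, t.2.2 + 1)), acc.2)
        else (acc.1.modify s (false, 0, 0) (fun t => (true, t.2.1, t.2.2)), acc.2))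
    = fun acc s =>
        if PySem.Str.isIn "." s then acc
        else if PySem.Str.isIn "|" s then
          (acc.1, acc.2.modify (pvPart0 s) [] (fun v => v ++ [s]))
        else (acc.1.modify (pvKey s) (false, 0, 0) (pvUpd s), acc.2) := by
  funext acc s
  by_cases hd : PySem.Str.isIn "." s
  · rw [if_pos hd, if_pos hd]
  · rw [if_neg hd, if_neg hd]
    by_cases hp : PySem.Str.isIn "|" s
    · rw [if_pos hp, if_pos hp]
    · rw [if_neg hp, if_neg hp]
      unfold pvKey
      by_cases hL : PySem.Str.endswith s "_left"
      · have hU : pvUpd s = fun t => (t.1, t.2.1 + 1, t.2.2) := by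
          funext t; unfold pvUpd; rw [if_pos hL]
        rw [if_pos hL, if_pos hL, hU]
      · rw [if_neg hL, if_neg hL]
        by_cases hR : PySem.Str.endswith s "_right"
        · have hU : pvUpd s = fun t => (t.1, t.2.1, t.2.2 + 1) := by
            funext t; unfold pvUpd; rw [if_neg hL, if_pos hR]
          rw [if_pos hR, if_pos hR, hU]
        · have hU : pvUpd s = fun t => (true, t.2.1, t.2.2) := by
            funext t; unfold pvUpd; rw [if_neg hL, if_neg hR]
          rw [if_neg hR, if_neg hR, hU]

-- ---- one pass with a product accumulator splits into two filtered passes ----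
theorem pv_foldl_prod_split {σ τ : Type} (l : List String) (p q : String → Bool)
    (f : σ → String → σ) (g : τ → String → τ) :
    ∀ (s : σ) (t : τ),
    l.foldl (fun acc x =>
        if p x then acc else if q x then (acc.1, g acc.2 x) else (f acc.1 x, acc.2)) (s, t)
      = ((l.filter (fun x => !p x && !q x)).foldl f s,
         (l.filter (fun x => !p x && q x)).foldl g t) := by
  induction l with
  | nil => intro s t; rfl
  | cons x xs ih =>
    intro s t
    rw [List.foldl_cons, List.filter_cons, List.filter_cons]
    cases hp : p x <;> cases hq : q x <;> simp [hp, hq, ih]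

-- ---- the filtered source lists coincide ----
theorem pv_filter_macro_list (parameters : List String) :
    (parameters.filter (fun s => !(PySem.Str.isIn "." s))).filter
        (fun p => !(PySem.Str.isIn "|" p))
      = parameters.filter (fun x => !(PySem.Str.isIn "." x) && !(PySem.Str.isIn "|" x)) := by
  rw [List.filter_filter]
  apply List.filter_congr
  intro x _
  exact Bool.and_comm _ _

theorem pv_filter_micro_list (parameters : List String) :
    (parameters.filter (fun s => !(PySem.Str.isIn "." s))).filter
        (fun p => PySem.Str.isIn "|" p)
      = parameters.filter (fun x => !(PySem.Str.isIn "." x) && PySem.Str.isIn "|" x) := by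
  rw [List.filter_filter]
  apply List.filter_congr
  intro x _
  exact Bool.and_comm _ _

-- ---- microscopic values and keys ----
theorem pv_mic_val (w : List String) (k : String) :
    ((PySem.List.sorted ((PySem.List.sorted w (fun x => x) false).map
        (fun s => (pvPart0 s, pvPart1 s))) (fun t => t.1) false).filter
          (fun t => t.1 == k)).map (fun t => t.2)
      = (PySem.List.sorted (w.filter (fun s => pvPart0 s == k)) (fun x => x) false).map
          pvPart1 := by
  rw [pv_sorted_filter_key (fun t : String × String => t.1) _ k]
  rw [List.filter_map, List.map_map, ← pv_sorted_filter w (fun s => pvPart0 s == k)]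
  have h1 : ((fun t : String × String => t.1 == k) ∘ (fun s => (pvPart0 s, pvPart1 s)))
      = fun s => pvPart0 s == k := rfl
  have h2 : ((fun t : String × String => t.2) ∘ (fun s => (pvPart0 s, pvPart1 s))) = pvPart1 := rfl
  rw [h1, h2]

theorem pv_mic_mem (w : List String) (x : String) :
    x ∈ (PySem.List.sorted ((PySem.List.sorted w (fun y => y) false).map
        (fun s => (pvPart0 s, pvPart1 s))) (fun t => t.1) false).map (fun t => t.1)
      ↔ x ∈ w.map pvPart0 := by
  constructor
  · intro hx
    obtain ⟨t, ht, rfl⟩ := List.mem_map.mp hx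
    rw [PySem.List.mem_sorted] at ht
    obtain ⟨s, hs, rfl⟩ := List.mem_map.mp ht
    rw [PySem.List.mem_sorted] at hs
    exact List.mem_map.mpr ⟨s, hs, rfl⟩
  · intro hx
    obtain ⟨s, hs, rfl⟩ := List.mem_map.mp hx
    apply List.mem_map.mpr
    refine ⟨(pvPart0 s, pvPart1 s), ?_, rfl⟩
    rw [PySem.List.mem_sorted]
    exact List.mem_map.mpr ⟨s, (PySem.List.mem_sorted w _ false s).mpr hs, rfl⟩

theorem pv_mic_keys (w : List String) :
    PySem.List.sorted ((PySem.Set.ofList (w.map pvPart0)) : List String) (fun x => x) false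
      = (PySem.Set.ofList ((PySem.List.sorted ((PySem.List.sorted w (fun y => y) false).map
          (fun s => (pvPart0 s, pvPart1 s))) (fun t => t.1) false).map (fun t => t.1))
        : List String) := by
  apply PySem.List.sorted_eq_of_perm_of_pairwise_lt
  · apply (List.perm_ext_iff_of_nodup (PySem.Set.nodup_ofList _) (PySem.Set.nodup_ofList _)).mpr
    intro a
    rw [pv_mem_ofList, pv_mem_ofList]
    exact pv_mic_mem w a
  · have h := pv_dedup_key_pairwise
      ((PySem.List.sorted ((PySem.List.sorted w (fun y => y) false).map
        (fun s => (pvPart0 s, pvPart1 s))) (fun t => t.1) false).map (fun t => t.1)).length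
      ((PySem.List.sorted ((PySem.List.sorted w (fun y => y) false).map
        (fun s => (pvPart0 s, pvPart1 s))) (fun t => t.1) false).map (fun t => t.1))
      le_rfl (fun x => x) (fun x => x)
      (PySem.List.sorted_map_key_pairwise _ _)
      (fun s hs => ⟨hs, rfl, fun t _ hts => le_of_eq hts.symm⟩)
    rwa [List.map_id'] at h

theorem pv_fold1 (parameters : List String) :
    (parameters.foldl (fun acc s =>
        if PySem.Str.isIn "." s then acc
        else if PySem.Str.isIn "|" s then
          (acc.1, acc.2.modify (pvPart0 s) [] (fun v => v ++ [s]))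
        else (acc.1.modify (pvKey s) (false, 0, 0) (pvUpd s), acc.2))
      ((PySem.Dict.empty : PySem.Dict String (Bool × Nat × Nat)),
       (PySem.Dict.empty : PySem.Dict String (List String)))).1
      = ((parameters.filter (fun x => !(PySem.Str.isIn "." x) && !(PySem.Str.isIn "|" x))).foldl
          (fun a s => a.modify (pvKey s) (false, 0, 0) (pvUpd s)) PySem.Dict.empty) :=
  congrArg Prod.fst (pv_foldl_prod_split parameters (PySem.Str.isIn ".") (PySem.Str.isIn "|")
    (fun a s => a.modify (pvKey s) (false, 0, 0) (pvUpd s))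
    (fun d s => d.modify (pvPart0 s) [] (fun v => v ++ [s])) PySem.Dict.empty PySem.Dict.empty)

theorem pv_fold2 (parameters : List String) :
    (parameters.foldl (fun acc s =>
        if PySem.Str.isIn "." s then acc
        else if PySem.Str.isIn "|" s then
          (acc.1, acc.2.modify (pvPart0 s) [] (fun v => v ++ [s]))
        else (acc.1.modify (pvKey s) (false, 0, 0) (pvUpd s), acc.2))
      ((PySem.Dict.empty : PySem.Dict String (Bool × Nat × Nat)),
       (PySem.Dict.empty : PySem.Dict String (List String)))).2
      = ((parameters.filter (fun x => !(PySem.Str.isIn "." x) && PySem.Str.isIn "|" x)).foldl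
          (fun d s => d.modify (pvPart0 s) [] (fun v => v ++ [s])) PySem.Dict.empty) :=
  congrArg Prod.snd (pv_foldl_prod_split parameters (PySem.Str.isIn ".") (PySem.Str.isIn "|")
    (fun a s => a.modify (pvKey s) (false, 0, 0) (pvUpd s))
    (fun d s => d.modify (pvPart0 s) [] (fun v => v ++ [s])) PySem.Dict.empty PySem.Dict.empty)

theorem pv_main (parameters : List String) :
    compute_parameters parameters = compute_parameters_alt parameters := by
  simp only [compute_parameters, compute_parameters_alt, separate_hemispheres]
  rw [pv_stepA_eq, pv_stepB_eq, pv_filter_macro_list, pv_filter_micro_list]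
  rw [pv_fold1, pv_fold2]
  rw [pv_items_tagfold]
  rw [pv_items_fold_sep _ (by
    rw [List.map_map]
    have : ((fun kv : String × List String => kv.1) ∘ (fun k : String =>
        (k, ((PySem.List.sorted (parameters.filter (fun x => !(PySem.Str.isIn "." x) && !(PySem.Str.isIn "|" x))) (fun x => x) false).filter (fun s => pvKey s == k)).flatMap pvTag)))
        = fun k => k := rfl
    rw [this, List.map_id']
    exact PySem.Set.nodup_ofList _)]
  rw [List.map_map]
  rw [pv_keys_macfold, pv_keys_micfold]
  set m := List.filter (fun x => !PySem.Str.isIn "." x && !PySem.Str.isIn "|" x) parameters with hm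
  set w := List.filter (fun x => !PySem.Str.isIn "." x && PySem.Str.isIn "|" x) parameters with hw
  set dM := List.foldl (fun a s => a.modify (pvKey s) (false, 0, 0) (pvUpd s)) PySem.Dict.empty m with hdM
  set dW := List.foldl (fun d s => d.modify (pvPart0 s) [] fun v => v ++ [s]) PySem.Dict.empty w with hdW
  have hgetD : ∀ c, dM.getD c (false, 0, 0) = (decide (0 < pvNB m c), pvNL m c, pvNR m c) := by
    intro c; rw [hdM]; exact pv_macroD_getD m c
  have hgetDW : ∀ c, dW.getD c [] = w.filter (fun s => pvPart0 s == c) := by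
    intro c; rw [hdW]; exact pv_microD_getD w c
  have hrep : (fun name => if (dM.getD name (false, 0, 0)).1 = true then name
      else if 0 < (dM.getD name (false, 0, 0)).2.1 then name ++ "_left"
      else name ++ "_right") = pvRep m := by
    funext name
    rw [hgetD name]
    unfold pvRep
    by_cases h1 : 0 < pvNB m name
    · simp [h1]
    · by_cases h2 : 0 < pvNL m name
      · simp [h1, h2]
      · simp [h1, h2]
  rw [hrep, pv_keys_sorted m]
  refine Prod.ext ?_ ?_
  · apply List.map_congr_left
    intro k _
    simp only [Function.comp_apply]
    rw [pv_bucket_flat m k, hgetD k]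
  · rw [pv_groupby_char (PySem.List.sorted (List.map (fun k => (pvPart0 k, pvPart1 k))
        (PySem.List.sorted w fun x => x)) (fun t => t.1)).length _ le_rfl
      (PySem.List.sorted_map_key_pairwise _ _)]
    rw [pv_items_fold_grp _ (by
      rw [List.map_map]
      have hcompid : ((fun kg : String × List (String × String) => kg.1) ∘ (fun k : String =>
          (k, (PySem.List.sorted (List.map (fun k => (pvPart0 k, pvPart1 k))
            (PySem.List.sorted w fun x => x)) (fun t => t.1)).filter (fun t => t.1 == k))))
          = fun k => k := rfl
      rw [hcompid, List.map_id']
      exact PySem.Set.nodup_ofList _)]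
    rw [List.map_map, pv_mic_keys w]
    apply List.map_congr_left
    intro k _
    simp only [Function.comp_apply]
    rw [pv_mic_val w k, hgetDW k]

-- ===== VERDICT (by name: the statement is the Claim_ definition above) =====
theorem compute_parameters_spec : Claim_equal_compute_parameters := by
  intro parameters _
  unfold Spec_compute_parameters
  exact pv_main parameters
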